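-- pv_equiv track=rewrite | github.com/gokou00/python_programming_challenges | codesignal/switchLights.py | switchLights
-- ===== SOURCE A (Python) =====
-- def switchLights(a):
--
--     for i in range(0,len(a)):
--
--         if a[i] == 1:
--             a[i] = 0
--
--             for j in range(i-1,-1,-1):
--                 if a[j] == 1:
--                     a[j] = 0
--                 else:
--                     a[j] = 1
--
--
--     return a
-- ===== SOURCE B (Python) =====
-- def switchLights(a):
--     # Single right-to-left pass: the final value at position i is
--     # (number of 1s strictly after i) % 2 whenever some 1 occurs at a
--     # position >= i; otherwise the original value is kept.  Mutates a
--     # in place and returns it, like A.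
--     c = 0  # number of 1s seen so far (strictly to the right)
--     for i in range(len(a) - 1, -1, -1):
--         v = a[i]
--         a[i] = c % 2 if (c != 0 or v == 1) else v
--         if v == 1:
--             c += 1
--     return a
-- ===== Notes on version B (the rewrite author's own statement) =====
-- stated objective: alternative
-- what changed: Replaced the nested flip-propagation (re-flipping the whole prefix at every encountered 1) by a single right-to-left pass that keeps a running count of 1s and writes count%2 directly.
import Mathlib
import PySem

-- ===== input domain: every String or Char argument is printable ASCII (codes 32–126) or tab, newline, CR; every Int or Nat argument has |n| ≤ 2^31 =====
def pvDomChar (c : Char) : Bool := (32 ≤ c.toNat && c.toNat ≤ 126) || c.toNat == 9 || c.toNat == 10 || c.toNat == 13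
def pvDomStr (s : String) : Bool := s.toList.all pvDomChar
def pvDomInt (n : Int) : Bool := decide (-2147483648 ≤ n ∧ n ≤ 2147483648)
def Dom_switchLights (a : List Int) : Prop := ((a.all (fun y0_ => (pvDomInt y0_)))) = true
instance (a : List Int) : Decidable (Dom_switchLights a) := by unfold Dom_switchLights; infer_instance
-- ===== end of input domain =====

-- B replaces A's nested flip-propagation by a single right-to-left counting pass (alternative algorithm).
-- A mutates its argument in place and returns it; B in Python mutates it the same way — the theorem is about the return value.


-- ===== PORT A =====
-- inner loop of A: for j in range(i-1,-1,-1): if a[j]==1: a[j]=0 else: a[j]=1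
def switchLightsInner (acc : List Int) (js : List Int) : List Int :=
  js.foldl (fun acc2 j =>
    if PySem.List.pyGetD acc2 j 0 = 1 then acc2.set j.toNat 0 else acc2.set j.toNat 1) acc

-- outer loop of A: for i in range(0,len(a)): if a[i]==1: a[i]=0; <inner loop>
def switchLights (a : List Int) : List Int :=
  (PySem.List.pyRange 0 (a.length : Int) 1).foldl (fun acc i =>
    if PySem.List.pyGetD acc i 0 = 1 then
      switchLightsInner (acc.set i.toNat 0) (PySem.List.pyRange (i - 1) (-1) (-1))
    else acc) a

-- ===== PORT B =====
-- right-to-left pass of B: returns (transformed suffix, count c of 1s in that suffix)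
def switchLightsAltGo : List Int → List Int × Int
  | [] => ([], 0)
  | v :: rest =>
    let (r, c) := switchLightsAltGo rest
    ((if c ≠ 0 ∨ v = 1 then c % 2 else v) :: r, c + (if v = 1 then 1 else 0))

def switchLights_alt (a : List Int) : List Int := (switchLightsAltGo a).1

-- ===== PRECONDITION & SPEC =====
def Spec_switchLights (a : List Int) (out : List Int) : Prop := out = switchLights_alt a
instance (a : List Int) (out : List Int) : Decidable (Spec_switchLights a out) := by unfold Spec_switchLights; infer_instance

-- ===== CLAIM (what is proved, stated in full; the proofs are below) =====
def Claim_equal_switchLights : Prop := ∀ (a : List Int), Dom_switchLights a → Spec_switchLights a (switchLights a)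

-- ===== LEMMAS AND PROOFS =====

-- the flip A's inner loop applies to each element left of a 1
def pvFlip (x : Int) : Int := if x = 1 then 0 else 1

theorem altGo_fst_cons (v : Int) (rest : List Int) :
    (switchLightsAltGo (v :: rest)).1 =
      (if (switchLightsAltGo rest).2 ≠ 0 ∨ v = 1 then (switchLightsAltGo rest).2 % 2 else v)
        :: (switchLightsAltGo rest).1 := rfl

theorem altGo_snd_cons (v : Int) (rest : List Int) :
    (switchLightsAltGo (v :: rest)).2 =
      (switchLightsAltGo rest).2 + (if v = 1 then 1 else 0) := rfl

theorem altGo_snd_nonneg (xs : List Int) : 0 ≤ (switchLightsAltGo xs).2 := by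
  induction xs with
  | nil => simp [switchLightsAltGo]
  | cons v rest ih =>
    rw [altGo_snd_cons]
    split_ifs <;> omega

theorem altGo_length (xs : List Int) : (switchLightsAltGo xs).1.length = xs.length := by
  induction xs with
  | nil => rfl
  | cons v rest ih => rw [altGo_fst_cons]; simp [ih]

theorem altGo_snd_snoc (xs : List Int) (v : Int) :
    (switchLightsAltGo (xs ++ [v])).2 =
      (switchLightsAltGo xs).2 + (if v = 1 then 1 else 0) := by
  induction xs with
  | nil => simp [switchLightsAltGo]
  | cons x rest ih =>
    rw [List.cons_append, altGo_snd_cons, altGo_snd_cons, ih]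
    ring

theorem altGo_fst_snoc (xs : List Int) (v : Int) :
    (switchLightsAltGo (xs ++ [v])).1 =
      if v = 1 then (switchLightsAltGo xs).1.map pvFlip ++ [0]
      else (switchLightsAltGo xs).1 ++ [v] := by
  induction xs with
  | nil => by_cases h : v = 1 <;> simp [switchLightsAltGo, h]
  | cons x rest ih =>
    have hnn := altGo_snd_nonneg rest
    rw [List.cons_append, altGo_fst_cons, ih, altGo_snd_snoc, altGo_fst_cons]
    by_cases h : v = 1
    · rw [if_pos h, if_pos h, if_pos h]
      rw [List.map_cons, List.cons_append]
      congr 1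
      rw [if_pos (Or.inl (by omega : ¬ (switchLightsAltGo rest).2 + 1 = 0))]
      by_cases hx : (switchLightsAltGo rest).2 ≠ 0 ∨ x = 1
      · rw [if_pos hx]
        simp only [pvFlip]
        split_ifs <;> omega
      · rw [if_neg hx]
        push_neg at hx
        simp only [pvFlip, if_neg hx.2]
        omega
    · rw [if_neg h, if_neg h, if_neg h, List.cons_append]
      simp

theorem set_drop_self (l : List Int) (k : Nat) (x : Int) (h : k < l.length) :
    (l.set k x).drop k = x :: l.drop (k + 1) := by
  induction l generalizing k with
  | nil => simp at h
  | cons y ys ih =>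
    cases k with
    | zero => simp
    | succ m =>
      simp only [List.set_cons_succ, List.drop_succ_cons]
      exact ih m (by simpa using h)

theorem take_succ_getElem (l : List Int) (k : Nat) (h : k < l.length) :
    l.take (k + 1) = l.take k ++ [l[k]] := by
  rw [List.take_add_one]
  simp [List.getElem?_eq_getElem h]

theorem drop_succ_getElem_cons (l : List Int) (k : Nat) (h : k < l.length) :
    l.drop k = l[k] :: l.drop (k + 1) := by
  induction l generalizing k with
  | nil => simp at h
  | cons y ys ih =>
    cases k with
    | zero => simp
    | succ m => simpa using ih m (by simpa using h)

theorem pyGetD_append_len (g d : List Int) (m : Nat) (hg : g.length = m) (x : Int)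
    (hd : d ≠ []) :
    PySem.List.pyGetD (g ++ d) (m : Int) x = d.head hd := by
  rw [PySem.List.pyGetD_natCast]
  rw [List.getD_eq_getElem?_getD, List.getElem?_append_right (by omega), hg]
  cases d with
  | nil => simp at hd
  | cons y ys => simp

-- A's inner loop over range(i-1,-1,-1) flips the first i elements and keeps the rest
theorem inner_flips (b : List Int) (i : Nat) (hi : i ≤ b.length) :
    switchLightsInner b (PySem.List.pyRange ((i : Int) - 1) (-1) (-1)) =
      (b.take i).map pvFlip ++ b.drop i := by
  induction i generalizing b with
  | zero => simp [switchLightsInner, PySem.List.pyRange_neg_one_eq_nil]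
  | succ k ih =>
    have hcast : ((k + 1 : Nat) : Int) - 1 = (k : Int) := by push_cast; ring
    rw [hcast, PySem.List.pyRange_neg_one_cons (by omega : (-1 : Int) < (k : Int))]
    have hk : k < b.length := by omega
    simp only [switchLightsInner, List.foldl_cons]
    have hget : PySem.List.pyGetD b (k : Int) 0 = b[k] := by
      rw [PySem.List.pyGetD_natCast, List.getD_eq_getElem?_getD,
          List.getElem?_eq_getElem hk]
      rfl
    have hstep :
        (if PySem.List.pyGetD b (k : Int) 0 = 1 then b.set (Int.toNat (k : Int)) 0
         else b.set (Int.toNat (k : Int)) 1) = b.set k (pvFlip b[k]) := by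
      rw [hget]
      simp only [Int.toNat_natCast, pvFlip]
      split_ifs <;> rfl
    rw [hstep]
    have hih := ih (b.set k (pvFlip b[k])) (by simp; omega)
    simp only [switchLightsInner] at hih
    rw [hih]
    rw [List.take_set_of_le (le_refl k), set_drop_self b k (pvFlip b[k]) hk,
        take_succ_getElem b k hk]
    simp only [List.map_append, List.map_cons, List.map_nil, List.append_assoc,
      List.cons_append, List.nil_append]

-- the outer-loop invariant: after the first k indices, the prefix carries B's transform
theorem outer_invariant (a : List Int) (k : Nat) (hk : k ≤ a.length) :
    (PySem.List.pyRange 0 (k : Int) 1).foldl (fun acc i =>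
      if PySem.List.pyGetD acc i 0 = 1 then
        switchLightsInner (acc.set i.toNat 0) (PySem.List.pyRange (i - 1) (-1) (-1))
      else acc) a
    = (switchLightsAltGo (a.take k)).1 ++ a.drop k := by
  induction k with
  | zero => simp [PySem.List.pyRange_one_eq_nil, switchLightsAltGo]
  | succ m ih =>
    have hm : m < a.length := by omega
    have hcast : ((m + 1 : Nat) : Int) = (m : Int) + 1 := by push_cast; ring
    rw [hcast, PySem.List.pyRange_one_succ_right (by omega : (0 : Int) ≤ (m : Int)),
        List.foldl_append, ih (by omega)]
    have hglen : (switchLightsAltGo (a.take m)).1.length = m := by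
      rw [altGo_length]; simp [List.length_take]; omega
    have hdm : a.drop m = a[m] :: a.drop (m + 1) := drop_succ_getElem_cons a m hm
    have hget : PySem.List.pyGetD ((switchLightsAltGo (a.take m)).1 ++ a.drop m) (m : Int) 0
        = a[m] := by
      rw [hdm, pyGetD_append_len _ _ m hglen 0 (List.cons_ne_nil _ _)]
      rfl
    simp only [List.foldl_cons, List.foldl_nil, hget]
    have hset : ((switchLightsAltGo (a.take m)).1 ++ a.drop m).set (Int.toNat (m : Int)) 0
        = (switchLightsAltGo (a.take m)).1 ++ 0 :: a.drop (m + 1) := by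
      rw [Int.toNat_natCast, List.set_append_right _ _ (by omega), hglen, Nat.sub_self, hdm]
      rfl
    have htka : a.take (m + 1) = a.take m ++ [a[m]] := take_succ_getElem a m hm
    by_cases h1 : a[m] = 1
    · rw [if_pos h1, hset]
      have hinner := inner_flips ((switchLightsAltGo (a.take m)).1 ++ 0 :: a.drop (m + 1))
        m (by simp [hglen])
      rw [hinner]
      have htk : ((switchLightsAltGo (a.take m)).1 ++ 0 :: a.drop (m + 1)).take m
          = (switchLightsAltGo (a.take m)).1 := by
        rw [List.take_append_of_le_length (by omega), List.take_of_length_le (by omega)]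
      have hdk : ((switchLightsAltGo (a.take m)).1 ++ 0 :: a.drop (m + 1)).drop m
          = 0 :: a.drop (m + 1) := by
        rw [List.drop_append_of_le_length (by omega), List.drop_eq_nil_of_le (by omega),
            List.nil_append]
      rw [htk, hdk, htka, altGo_fst_snoc, if_pos h1]
      simp
    · rw [if_neg h1, htka, altGo_fst_snoc, if_neg h1, hdm]
      simp

theorem switchLights_eq_alt (a : List Int) : switchLights a = switchLights_alt a := by
  have h := outer_invariant a a.length (le_refl _)
  simpa [switchLights, switchLights_alt, switchLightsInner] using h

-- ===== VERDICT (by name: the statement is the Claim_ definition above) =====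
theorem switchLights_spec : Claim_equal_switchLights := by
  intro a _
  exact switchLights_eq_alt a
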